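-- pv_equiv track=rewrite | github.com/Ukasz11233/Algorithms | Algorytmy/Egzamin III/Zadanie2.py | Tower
-- ===== SOURCE A (Python) =====
-- def Tower(A):
--     n = len(A)
--     result = 0
--     actual_max = 1
--     for i in range(n):
--         base = A[i]
--         for j in range(i+1, n):
--             if base[0] <= A[j][0] and base[1] >= A[j][1]:
--                 base = A[j]
--                 actual_max += 1
--
--         if result < actual_max:
--             result = actual_max
--         actual_max = 1
--
--     return result
-- ===== SOURCE B (Python) =====
-- def _first_succ(A, i, n):
--     for j in range(i + 1, n):
--         if A[j][0] >= A[i][0] and A[j][1] <= A[i][1]: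
--             return j
--     return None
--
--
-- def Tower(A):
--     n = len(A)
--     f = [0] * n
--     best = 0
--     for i in range(n - 1, -1, -1):
--         j = _first_succ(A, i, n)
--         f[i] = 1 if j is None else 1 + f[j]
--         if f[i] > best:
--             best = f[i]
--     return best
-- ===== Notes on version B (the rewrite author's own statement) =====
-- stated objective: alternative
-- what changed: A restarts a full greedy chain walk from every start index; B computes each start's chain length once by a right-to-left memoised DP (f[i] = 1 + f[first successor of i]), stopping each inner scan at the first successor and reusing stored results.
-- outside the precondition, e.g. on Tower([(5,), (1, 2)]): A returns 1, B returns 1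
import Mathlib
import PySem

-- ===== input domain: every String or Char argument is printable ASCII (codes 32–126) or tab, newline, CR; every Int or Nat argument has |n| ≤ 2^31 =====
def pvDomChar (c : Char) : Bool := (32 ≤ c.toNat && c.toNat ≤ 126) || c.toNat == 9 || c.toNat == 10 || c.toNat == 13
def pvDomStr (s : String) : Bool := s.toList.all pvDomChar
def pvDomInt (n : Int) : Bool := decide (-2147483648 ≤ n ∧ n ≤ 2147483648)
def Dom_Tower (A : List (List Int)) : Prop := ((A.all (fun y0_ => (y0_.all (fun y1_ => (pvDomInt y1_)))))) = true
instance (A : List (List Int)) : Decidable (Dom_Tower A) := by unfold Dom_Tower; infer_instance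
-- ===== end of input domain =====

-- B replaces A's per-start greedy rescan by a right-to-left memoised DP (first successor + reuse of
-- previously computed chain lengths); objective: alternative algorithm, same return value.

-- ===== PORT A =====
-- Literal port of A: outer loop over i, inner greedy loop over j updating (base, actual_max).
-- Indexing A[i]/row[0]/row[1] is ported with pyGetD (exact under Pre_Tower, where Python does not raise).
def innerStepA (A : List (List Int)) (t : (List Int) × Int) (j : Int) : (List Int) × Int :=
  if PySem.List.pyGetD t.1 0 0 ≤ PySem.List.pyGetD (PySem.List.pyGetD A j []) 0 0 ∧
     PySem.List.pyGetD t.1 1 0 ≥ PySem.List.pyGetD (PySem.List.pyGetD A j []) 1 0 then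
    (PySem.List.pyGetD A j [], t.2 + 1)
  else t

def outerStepA (A : List (List Int)) (n : Int) (s : Int × Int) (i : Int) : Int × Int :=
  let inner := (PySem.List.pyRange (i + 1) n 1).foldl (innerStepA A) (PySem.List.pyGetD A i [], s.2)
  ((if s.1 < inner.2 then inner.2 else s.1), 1)

def Tower (A : List (List Int)) : Int :=
  let n : Int := PySem.List.len A
  ((PySem.List.pyRange 0 n 1).foldl (outerStepA A n) (0, 1)).1

-- ===== PORT B =====
-- helper _first_succ of Source B: first j in (i, n) dominated by A[i] (for-loop with early return = find?)
def firstSuccB (A : List (List Int)) (i n : Int) : Option Int :=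
  (PySem.List.pyRange (i + 1) n 1).find? (fun j =>
    decide (PySem.List.pyGetD (PySem.List.pyGetD A j []) 0 0 ≥ PySem.List.pyGetD (PySem.List.pyGetD A i []) 0 0) &&
    decide (PySem.List.pyGetD (PySem.List.pyGetD A j []) 1 0 ≤ PySem.List.pyGetD (PySem.List.pyGetD A i []) 1 0))

-- one iteration of Source B's descending loop: fill memo f[i], update running best
def stepB (A : List (List Int)) (n : Int) (s : (List Int) × Int) (i : Int) : (List Int) × Int :=
  let fi : Int :=
    match firstSuccB A i n with
    | none => 1
    | some j => 1 + PySem.List.pyGetD s.1 j 0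
  (PySem.List.pySetD s.1 i fi, if fi > s.2 then fi else s.2)

def Tower_alt (A : List (List Int)) : Int :=
  let n : Int := PySem.List.len A
  ((PySem.List.pyRange (n - 1) (-1) (-1)).foldl (stepB A n) (List.replicate A.length 0, 0)).2

-- ===== PRECONDITION & SPEC =====
-- Pre_ excludes inputs containing a row with fewer than 2 entries (unless len(A) ≤ 1, where no row is
-- indexed): on those A generally raises IndexError, except when short-circuit evaluation happens to skip
-- the missing entry, an accident of evaluation order; B behaves like A wherever both return.
def Pre_Tower (A : List (List Int)) : Prop := A.length ≤ 1 ∨ ∀ row ∈ A, 2 ≤ row.length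
instance (A : List (List Int)) : Decidable (Pre_Tower A) := by unfold Pre_Tower; infer_instance
def pvWitness_Tower : List (List Int) := [[3, 5], [3, 4], [4, 4], [2, 2]]

def Spec_Tower (A : List (List Int)) (out : Int) : Prop := out = Tower_alt A
instance (A : List (List Int)) (out : Int) : Decidable (Spec_Tower A out) := by unfold Spec_Tower; infer_instance

-- ===== CLAIM (what is proved, stated in full; the proofs are below) =====
def Claim_equal_Tower : Prop := ∀ (A : List (List Int)), Dom_Tower A → Pre_Tower A → Spec_Tower A (Tower A)

-- ===== LEMMAS AND PROOFS =====

-- greedy chain length of A's inner loop, starting from base, over the remaining rows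
def chainLen : List Int → List (List Int) → Int
  | _, [] => 0
  | b, r :: rs =>
    if PySem.List.pyGetD b 0 0 ≤ PySem.List.pyGetD r 0 0 ∧
       PySem.List.pyGetD b 1 0 ≥ PySem.List.pyGetD r 1 0 then
      1 + chainLen r rs
    else chainLen b rs

-- chain length started at index k (the per-start value both programs compute)
def gT (A : List (List Int)) (k : Nat) : Int := 1 + chainLen (A.getD k []) (A.drop (k + 1))

lemma innerFold (rs : List (List Int)) : ∀ (b : List Int) (c : Int),
    ((rs.foldl
      (fun (t : (List Int) × Int) r =>
        if PySem.List.pyGetD t.1 0 0 ≤ PySem.List.pyGetD r 0 0 ∧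
           PySem.List.pyGetD t.1 1 0 ≥ PySem.List.pyGetD r 1 0 then
          (r, t.2 + 1)
        else t)
      (b, c)).2) = c + chainLen b rs := by
  induction rs with
  | nil => intro b c; simp [chainLen]
  | cons r rs ih =>
    intro b c
    simp only [List.foldl_cons, chainLen]
    split
    · rw [ih]; ring
    · rw [ih]

lemma innerChain (A : List (List Int)) (k : Nat) (c : Int) :
    ((PySem.List.pyRange ((k : Int) + 1) (A.length : Int) 1).foldl (innerStepA A)
      (PySem.List.pyGetD A (k : Int) [], c)).2
    = c + chainLen (A.getD k []) (A.drop (k + 1)) := by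
  have h := PySem.List.foldl_pyRange_pyGetD' (a := (k : Int) + 1) (xs := A) (d := ([] : List Int))
    (f := fun (t : (List Int) × Int) row =>
      if PySem.List.pyGetD t.1 0 0 ≤ PySem.List.pyGetD row 0 0 ∧
         PySem.List.pyGetD t.1 1 0 ≥ PySem.List.pyGetD row 1 0 then
        (row, t.2 + 1)
      else t)
    (init := (PySem.List.pyGetD A (k : Int) [], c)) (by omega)
  simp only [] at h
  have hb : (PySem.List.pyRange ((k : Int) + 1) (A.length : Int) 1).foldl (innerStepA A)
      (PySem.List.pyGetD A (k : Int) [], c)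
      = (PySem.List.pyRange ((k : Int) + 1) (A.length : Int) 1).foldl
        (fun (t : (List Int) × Int) j =>
          if PySem.List.pyGetD t.1 0 0 ≤ PySem.List.pyGetD (PySem.List.pyGetD A j []) 0 0 ∧
             PySem.List.pyGetD t.1 1 0 ≥ PySem.List.pyGetD (PySem.List.pyGetD A j []) 1 0 then
            (PySem.List.pyGetD A j [], t.2 + 1)
          else t)
        (PySem.List.pyGetD A (k : Int) [], c) := by
    apply PySem.List.foldl_congr_mem
    intro acc x _
    rfl
  rw [hb, h, innerFold]
  have : ((k : Int) + 1).toNat = k + 1 := by omega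
  rw [this, PySem.List.pyGetD_natCast]

lemma maxIfLt (a b : Int) : (if a < b then b else a) = max a b := by
  split <;> omega

lemma maxIfGt (a b : Int) : (if b > a then b else a) = max a b := by
  split <;> omega

lemma outerA (A : List (List Int)) : ∀ (m k : Nat), A.length = k + m → ∀ (res : Int),
    (PySem.List.pyRange (k : Int) (A.length : Int) 1).foldl (outerStepA A (A.length : Int)) (res, 1)
    = (((List.range' k m).map (gT A)).foldl max res, 1) := by
  intro m
  induction m with
  | zero =>
    intro k hk res
    rw [PySem.List.pyRange_one_eq_nil (by omega)]
    simp
  | succ m ih =>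
    intro k hk res
    rw [PySem.List.pyRange_one_cons (by exact_mod_cast (by omega : (k : Int) < (A.length : Int)))]
    rw [List.foldl_cons]
    have hstep : outerStepA A (A.length : Int) (res, 1) (k : Int) = (max res (gT A k), 1) := by
      simp only [outerStepA]
      rw [innerChain A k 1]
      rw [maxIfLt]
      rfl
    rw [hstep]
    rw [show ((k : Int) + 1) = ((k + 1 : Nat) : Int) by push_cast; ring]
    rw [ih (k + 1) (by omega) (max res (gT A k))]
    rw [show List.range' k (m + 1) = k :: List.range' (k + 1) m from by rw [List.range'_succ]]
    simp

-- value the DP assigns given the result of the first-successor search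
def chainOfFind (A : List (List Int)) : Option Int → Int
  | none => 0
  | some j => 1 + chainLen (A.getD j.toNat []) (A.drop (j.toNat + 1))

lemma findChainB (A : List (List Int)) (i : Int) (_hi0 : 0 ≤ i) :
    ∀ (m k : Nat), A.length = k + m → i < (k : Int) →
    chainOfFind A ((PySem.List.pyRange (k : Int) (A.length : Int) 1).find? (fun j =>
        decide (PySem.List.pyGetD (PySem.List.pyGetD A j []) 0 0 ≥ PySem.List.pyGetD (PySem.List.pyGetD A i []) 0 0) &&
        decide (PySem.List.pyGetD (PySem.List.pyGetD A j []) 1 0 ≤ PySem.List.pyGetD (PySem.List.pyGetD A i []) 1 0)))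
    = chainLen (PySem.List.pyGetD A i []) (A.drop k) := by
  intro m
  induction m with
  | zero =>
    intro k hk hik
    rw [PySem.List.pyRange_one_eq_nil (by omega)]
    simp [List.drop_eq_nil_of_le (by omega : A.length ≤ k), chainLen, chainOfFind]
  | succ m ih =>
    intro k hk hik
    have hklt : k < A.length := by omega
    rw [PySem.List.pyRange_one_cons (by exact_mod_cast (by omega : (k : Int) < (A.length : Int)))]
    rw [List.find?_cons]
    have hdrop : A.drop k = A.getD k [] :: A.drop (k + 1) := by
      rw [List.getD_eq_getElem A [] hklt]
      exact List.drop_eq_getElem_cons hklt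
    rw [hdrop]
    have hAk : PySem.List.pyGetD A (k : Int) [] = A.getD k [] := PySem.List.pyGetD_natCast ..
    by_cases hc : PySem.List.pyGetD (PySem.List.pyGetD A i []) 0 0 ≤ PySem.List.pyGetD (A.getD k []) 0 0 ∧
        PySem.List.pyGetD (PySem.List.pyGetD A i []) 1 0 ≥ PySem.List.pyGetD (A.getD k []) 1 0
    · have hcb : ((decide (PySem.List.pyGetD (PySem.List.pyGetD A (k : Int) []) 0 0 ≥ PySem.List.pyGetD (PySem.List.pyGetD A i []) 0 0)) &&
          (decide (PySem.List.pyGetD (PySem.List.pyGetD A (k : Int) []) 1 0 ≤ PySem.List.pyGetD (PySem.List.pyGetD A i []) 1 0))) = true := by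
        rw [hAk]; simp only [Bool.and_eq_true, decide_eq_true_eq]; exact ⟨hc.1, hc.2⟩
      rw [hcb]
      simp only [chainOfFind, chainLen, if_pos hc]
      rw [show ((k : Int)).toNat = k by omega]
    · have hcb : ((decide (PySem.List.pyGetD (PySem.List.pyGetD A (k : Int) []) 0 0 ≥ PySem.List.pyGetD (PySem.List.pyGetD A i []) 0 0)) &&
          (decide (PySem.List.pyGetD (PySem.List.pyGetD A (k : Int) []) 1 0 ≤ PySem.List.pyGetD (PySem.List.pyGetD A i []) 1 0))) = false := by
        rw [hAk]
        rw [Bool.and_eq_false_iff]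
        by_cases h1 : PySem.List.pyGetD (PySem.List.pyGetD A i []) 0 0 ≤ PySem.List.pyGetD (A.getD k []) 0 0
        · right; simp only [decide_eq_false_iff_not]; intro h2; exact hc ⟨h1, h2⟩
        · left; simp only [decide_eq_false_iff_not]; exact h1
      rw [hcb]
      rw [show ((k : Int) + 1) = ((k + 1 : Nat) : Int) by push_cast; ring]
      rw [ih (k + 1) (by omega) (by omega)]
      simp only [chainLen, if_neg hc]

lemma outerB (A : List (List Int)) : ∀ (k : Nat), k ≤ A.length →
    ∀ (f : List Int) (best : Int), f.length = A.length →
    (∀ j : Nat, k ≤ j → j < A.length → PySem.List.pyGetD f (j : Int) 0 = gT A j) →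
    ((PySem.List.pyRange ((k : Int) - 1) (-1) (-1)).foldl (stepB A (A.length : Int)) (f, best)).2
    = (((List.range k).reverse.map (gT A)).foldl max best) := by
  intro k
  induction k with
  | zero =>
    intro _ f best _ _
    rw [PySem.List.pyRange_neg_one_eq_nil (by omega)]
    simp
  | succ k ih =>
    intro hk f best hlen hinv
    rw [show ((k + 1 : Nat) : Int) - 1 = ((k : Nat) : Int) by push_cast; ring]
    rw [PySem.List.pyRange_neg_one_cons (by omega : (-1 : Int) < ((k : Nat) : Int))]
    rw [List.foldl_cons]
    have hfi : (match firstSuccB A (k : Int) (A.length : Int) with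
        | none => (1 : Int)
        | some j => 1 + PySem.List.pyGetD f j 0) = gT A k := by
      have hchain := findChainB A (k : Int) (by omega) (A.length - (k + 1)) (k + 1) (by omega)
        (by exact_mod_cast (by omega : (k : Int) < ((k + 1 : Nat) : Int)))
      unfold firstSuccB
      rw [show (k : Int) + 1 = ((k + 1 : Nat) : Int) by push_cast; ring]
      cases hfind : (PySem.List.pyRange ((k + 1 : Nat) : Int) (A.length : Int) 1).find? (fun j =>
          decide (PySem.List.pyGetD (PySem.List.pyGetD A j []) 0 0 ≥ PySem.List.pyGetD (PySem.List.pyGetD A (k : Int) []) 0 0) &&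
          decide (PySem.List.pyGetD (PySem.List.pyGetD A j []) 1 0 ≤ PySem.List.pyGetD (PySem.List.pyGetD A (k : Int) []) 1 0)) with
      | none =>
        rw [hfind] at hchain
        simp only [chainOfFind] at hchain
        simp only at ⊢
        rw [PySem.List.pyGetD_natCast] at hchain
        unfold gT
        omega
      | some j =>
        rw [hfind] at hchain
        have hjmem : j ∈ PySem.List.pyRange ((k + 1 : Nat) : Int) (A.length : Int) 1 :=
          List.mem_of_find?_eq_some hfind
        rw [PySem.List.mem_pyRange_one] at hjmem
        have hj2 : j.toNat < A.length := by omega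
        have hfj : PySem.List.pyGetD f j 0 = gT A j.toNat := by
          rw [show j = ((j.toNat : Nat) : Int) by omega]
          exact hinv j.toNat (by omega) hj2
        simp only [chainOfFind] at hchain
        simp only at ⊢
        rw [hfj]
        rw [PySem.List.pyGetD_natCast] at hchain
        unfold gT at *
        exact congrArg (fun t => 1 + t) hchain
    have hstep : stepB A (A.length : Int) (f, best) (k : Int)
        = (PySem.List.pySetD f (k : Int) (gT A k), max best (gT A k)) := by
      simp only [stepB]
      rw [hfi, maxIfGt]
    rw [hstep]
    have hset : ∀ j : Nat, k ≤ j → j < A.length →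
        PySem.List.pyGetD (PySem.List.pySetD f (k : Int) (gT A k)) (j : Int) 0 = gT A j := by
      intro j hj1 hj2
      rw [PySem.List.pyGetD_pySetD_natCast f k j (gT A k) 0 (by omega)]
      by_cases hjk : j = k
      · rw [if_pos hjk, hjk]
      · rw [if_neg hjk]
        exact hinv j (by omega) hj2
    rw [ih (by omega) _ _ (by rw [PySem.List.length_pySetD]; exact hlen) hset]
    rw [List.range_succ]
    simp

lemma foldl_max_comm (l : List Int) : ∀ (a b : Int), l.foldl max (max a b) = max (l.foldl max a) b := by
  induction l with
  | nil => intro a b; simp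
  | cons x xs ih =>
    intro a b
    simp only [List.foldl_cons]
    rw [show max (max a b) x = max (max a x) b by omega, ih]

lemma foldl_max_reverse (l : List Int) : ∀ (b : Int), l.reverse.foldl max b = l.foldl max b := by
  induction l with
  | nil => intro b; rfl
  | cons x xs ih =>
    intro b
    rw [List.reverse_cons, List.foldl_append, ih]
    simp only [List.foldl_cons, List.foldl_nil]
    exact (foldl_max_comm xs b x).symm

-- ===== VERDICT (by name: the statement is the Claim_ definition above) =====
theorem Tower_spec : Claim_equal_Tower := by
  intro A _ _
  show Tower A = Tower_alt A
  unfold Tower Tower_alt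
  simp only [PySem.List.len_eq]
  have hA := outerA A A.length 0 (by omega) 0
  simp only [Nat.cast_zero] at hA
  have hB := outerB A A.length (by omega) (List.replicate A.length 0) 0 (by simp)
    (by intro j h1 h2; omega)
  rw [hA, hB]
  rw [List.map_reverse, foldl_max_reverse]
  rw [← List.range_eq_range']
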